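-- pv_equiv track=rewrite | github.com/TomasFerranti/DataScienceDissertation | src/SMTools/app/scripts/camera_calibration.py | getCalibType
-- ===== SOURCE A (Python) =====
-- def getCalibType(img_calib):
--     """
--     getCalibType returns the information about which calibration type is going to be employed
--
--     Parameters
--     - img_calib:dict, has key 'pontosguia' which is a list of len 3 of lists of points
--
--     Return
--     - cab_type:str, type of calibration (normal or centrado)
--     - missing_idx:int, if type is centrado this is the index of the missing calibration axis
--     """
--     cab_type = "normal"
--     missing_idx = None
--     for dim in range(0, 3):
--         if len(img_calib['pontosguia'][(dim) % 3]) == 0 and len(img_calib['pontosguia'][(dim + 1) % 3]) > 0 and len(img_calib['pontosguia'][(dim + 2) % 3]) > 0: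
--             cab_type = "centrado"
--             missing_idx = dim
--             break
--     return cab_type, missing_idx
-- ===== SOURCE B (Python) =====
-- def getCalibType(img_calib):
--     """Collect the indices of empty guide-point axes, then classify by their count."""
--     pts = img_calib['pontosguia']
--     empties = [i for i in range(3) if len(pts[i]) == 0]
--     if len(empties) == 1:
--         return "centrado", empties[0]
--     return "normal", None
-- ===== Notes on version B (the rewrite author's own statement) =====
-- stated objective: simpler
-- what changed: Replaces the rotating modular scan with early break by collecting the indices of empty axes in one comprehension and classifying by the count (exactly one empty -> 'centrado' with that index, else 'normal').
import Mathlib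
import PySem

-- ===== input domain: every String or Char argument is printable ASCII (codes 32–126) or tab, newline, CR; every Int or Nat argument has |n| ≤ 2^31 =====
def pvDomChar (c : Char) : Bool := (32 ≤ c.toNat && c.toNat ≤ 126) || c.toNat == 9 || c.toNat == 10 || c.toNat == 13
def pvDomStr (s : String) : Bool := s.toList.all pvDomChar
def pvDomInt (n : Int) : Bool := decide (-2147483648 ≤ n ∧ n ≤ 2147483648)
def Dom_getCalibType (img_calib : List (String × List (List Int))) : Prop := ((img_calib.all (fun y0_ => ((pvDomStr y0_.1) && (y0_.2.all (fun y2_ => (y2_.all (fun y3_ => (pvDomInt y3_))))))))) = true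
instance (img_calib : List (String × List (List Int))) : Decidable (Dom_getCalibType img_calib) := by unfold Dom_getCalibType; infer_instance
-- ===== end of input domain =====

-- B collects the indices of empty guide-point axes and classifies by their count,
-- instead of A's rotating modular scan with early break (objective: simpler).


-- ===== PORT A =====
-- loop 'for dim in range(0,3)' with break: structural recursion over the remaining dims;
-- pts[(…)%3] is PySem.List.pyGet? after PySem.Int.mod; under Pre_ the lookups are in range
-- (the .getD [] default is only reached outside Pre_, where A raises).
def getCalibTypeLoopA (pts : List (List Int)) : List Int → String × Option Int
  | [] => ("normal", none)
  | dim :: rest =>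
    if ((PySem.List.pyGet? pts (PySem.Int.mod dim 3)).getD []).length = 0
        ∧ ((PySem.List.pyGet? pts (PySem.Int.mod (dim + 1) 3)).getD []).length > 0
        ∧ ((PySem.List.pyGet? pts (PySem.Int.mod (dim + 2) 3)).getD []).length > 0 then
      ("centrado", some dim)
    else
      getCalibTypeLoopA pts rest

def getCalibType (img_calib : List (String × List (List Int))) : String × Option Int :=
  let pts := (PySem.Dict.get? (PySem.Dict.mk img_calib) "pontosguia").getD []
  getCalibTypeLoopA pts (PySem.List.pyRange 0 3 1)

-- ===== PORT B =====
def getCalibType_alt (img_calib : List (String × List (List Int))) : String × Option Int :=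
  let pts := (PySem.Dict.get? (PySem.Dict.mk img_calib) "pontosguia").getD []
  let empties := (PySem.List.pyRange 0 3 1).filter
    (fun i => ((PySem.List.pyGet? pts i).getD []).length = 0)
  match empties with
  | [i] => ("centrado", some i)
  | _ => ("normal", none)

-- ===== PRECONDITION & SPEC =====
-- Pre_ excludes exactly the inputs where A raises: a missing 'pontosguia' key (KeyError)
-- or a value with fewer than 3 point lists (IndexError).
def Pre_getCalibType (img_calib : List (String × List (List Int))) : Prop :=
  3 ≤ (((PySem.Dict.get? (PySem.Dict.mk img_calib) "pontosguia").map List.length).getD 0)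
instance (img_calib : List (String × List (List Int))) : Decidable (Pre_getCalibType img_calib) := by unfold Pre_getCalibType; infer_instance

def pvWitness_getCalibType : (List (String × List (List Int))) :=
  [("pontosguia", [[(1:Int)], [], [2]])]

def Spec_getCalibType (img_calib : List (String × List (List Int))) (out : String × Option Int) : Prop := out = getCalibType_alt img_calib
instance (img_calib : List (String × List (List Int))) (out : String × Option Int) : Decidable (Spec_getCalibType img_calib out) := by unfold Spec_getCalibType; infer_instance

-- ===== CLAIM (what is proved, stated in full; the proofs are below) =====
def Claim_equal_getCalibType : Prop := ∀ (img_calib : List (String × List (List Int))), Dom_getCalibType img_calib → Pre_getCalibType img_calib → Spec_getCalibType img_calib (getCalibType img_calib)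

-- ===== LEMMAS AND PROOFS =====
theorem getCalibType_agree (a b c : List Int) (rest : List (List Int)) :
    getCalibTypeLoopA (a :: b :: c :: rest) (PySem.List.pyRange 0 3 1)
      = (match (PySem.List.pyRange 0 3 1).filter
            (fun i => ((PySem.List.pyGet? (a :: b :: c :: rest) i).getD []).length = 0) with
         | [i] => ("centrado", some i)
         | _ => ("normal", none)) := by
  rw [show PySem.List.pyRange 0 3 1 = [(0:Int),1,2] from by decide]
  have h0 : (0:Int) ≤ (rest.length:Int) + 1 + 1 := by omega
  have h1 : (0:Int) ≤ (rest.length:Int) + 1 := by omega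
  have h2 : (2:Int) ≤ (rest.length:Int) + 1 + 1 := by omega
  by_cases ha : a = [] <;> by_cases hb : b = [] <;> by_cases hc : c = [] <;>
    simp [getCalibTypeLoopA, PySem.List.pyGet?, PySem.List.pyIdx?,
      PySem.Int.mod, ha, hb, hc, h0, h1, h2, List.filter, List.length_eq_zero_iff]

-- ===== VERDICT (by name: the statement is the Claim_ definition above) =====
theorem getCalibType_spec : Claim_equal_getCalibType := by
  intro img_calib _ hpre
  unfold Spec_getCalibType getCalibType getCalibType_alt
  unfold Pre_getCalibType at hpre
  cases hv : PySem.Dict.get? (PySem.Dict.mk img_calib) "pontosguia" with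
  | none => simp [hv] at hpre
  | some v =>
    rw [hv] at hpre; simp at hpre
    match v, hpre with
    | a :: b :: c :: rest, _ => simpa [hv] using getCalibType_agree a b c rest
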